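-- pv_equiv track=rewrite | github.com/dashaat/Dashboard-for-Sales-Analytics | dynamic_bi_dashboard.py | detect_target_metric
-- ===== SOURCE A (Python) =====
-- def detect_target_metric(metric_cols: list[str]) -> str | None:
--     if not metric_cols:
--         return None
--     target_keywords = ["revenue", "sales", "amount", "profit", "income"]
--     for kw in target_keywords:
--         for col in metric_cols:
--             if kw in col.lower():
--                 return col
--     return metric_cols[0]
-- ===== SOURCE B (Python) =====
-- def detect_target_metric(metric_cols: list[str]) -> str | None:
--     if not metric_cols:
--         return None
--     target_keywords = ["revenue", "sales", "amount", "profit", "income"]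
--     best_col = None
--     best_idx = len(target_keywords)
--     for col in metric_cols:
--         low = col.lower()
--         i = next((i for i, kw in enumerate(target_keywords) if kw in low), None)
--         if i is not None and i < best_idx:
--             best_idx = i
--             best_col = col
--     return best_col if best_col is not None else metric_cols[0]
-- ===== Notes on version B (the rewrite author's own statement) =====
-- stated objective: alternative
-- what changed: Replaced the keyword-outer/column-inner nested scan with early return by a single pass over the columns that tracks the column with the smallest matching keyword index (strict-less update preserves A's tie-breaking).
import Mathlib
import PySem

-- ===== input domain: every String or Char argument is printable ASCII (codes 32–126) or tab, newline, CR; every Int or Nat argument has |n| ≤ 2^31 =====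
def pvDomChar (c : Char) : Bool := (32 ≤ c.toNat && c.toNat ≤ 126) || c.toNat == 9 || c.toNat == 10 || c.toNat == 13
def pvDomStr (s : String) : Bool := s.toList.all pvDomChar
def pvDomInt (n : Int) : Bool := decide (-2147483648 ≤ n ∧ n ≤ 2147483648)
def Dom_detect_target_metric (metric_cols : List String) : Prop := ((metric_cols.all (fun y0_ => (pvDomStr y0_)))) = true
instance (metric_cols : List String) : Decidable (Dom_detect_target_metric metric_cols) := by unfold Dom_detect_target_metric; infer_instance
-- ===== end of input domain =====

-- B replaces A's keyword-outer nested scan by one pass over the columns tracking the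
-- smallest matching keyword index (alternative decomposition, same cost).

-- ===== PORT A =====
-- A: for kw in keywords: for col in cols: if kw in col.lower(): return col  — a first-match
-- nested search, rendered as findSome?/find? (first keyword whose first matching column exists).
def detect_target_metric (metric_cols : List String) : Option String :=
  if metric_cols = [] then none
  else
    match (["revenue", "sales", "amount", "profit", "income"]).findSome?
        (fun kw => metric_cols.find? (fun col => PySem.Str.isIn kw (PySem.Str.lower col))) with
    | some col => some col
    | none => metric_cols[0]?

-- ===== PORT B =====
-- Source B: i = next((i for i, kw in enumerate(target_keywords) if kw in low), None)
def pvFirstKwIdx (low : String) : Option Nat :=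
  (["revenue", "sales", "amount", "profit", "income"]).findIdx?
    (fun kw => PySem.Str.isIn kw low)

-- Source B loop body: update (best_col, best_idx) when the column's keyword index is strictly smaller
def pvStep (acc : Option String × Nat) (col : String) : Option String × Nat :=
  match pvFirstKwIdx (PySem.Str.lower col) with
  | some i => if i < acc.2 then (some col, i) else acc
  | none => acc

def detect_target_metric_alt (metric_cols : List String) : Option String :=
  if metric_cols = [] then none
  else
    let best := metric_cols.foldl pvStep ((none : Option String), 5)
    match best.1 with
    | some c => some c
    | none => metric_cols[0]?

-- ===== PRECONDITION & SPEC =====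
def Spec_detect_target_metric (metric_cols : List String) (out : Option String) : Prop := out = detect_target_metric_alt metric_cols
instance (metric_cols : List String) (out : Option String) : Decidable (Spec_detect_target_metric metric_cols out) := by unfold Spec_detect_target_metric; infer_instance

-- ===== CLAIM (what is proved, stated in full; the proofs are below) =====
def Claim_equal_detect_target_metric : Prop := ∀ (metric_cols : List String), Dom_detect_target_metric metric_cols → Spec_detect_target_metric metric_cols (detect_target_metric metric_cols)

-- ===== LEMMAS AND PROOFS =====

-- generalized step over an arbitrary index function
def gstep (f : String → Option Nat) (acc : Option String × Nat) (col : String) : Option String × Nat :=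
  match f col with
  | some i => if i < acc.2 then (some col, i) else acc
  | none => acc

theorem gstep_pvStep : pvStep = gstep (fun col => pvFirstKwIdx (PySem.Str.lower col)) := rfl

-- once the best index is 0 the accumulator never changes
theorem fold_zero_fixed (f : String → Option Nat) (cols : List String) (x : Option String) :
    cols.foldl (gstep f) (x, 0) = (x, 0) := by
  induction cols with
  | nil => rfl
  | cons c cs ih =>
      simp only [List.foldl_cons]
      have : gstep f (x, 0) c = (x, 0) := by
        unfold gstep
        cases f c with
        | none => rfl
        | some i => simp
      rw [this, ih]

-- if some column has index 0, the fold returns the first such column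
theorem fold_zero_wins (f : String → Option Nat) (cols : List String) (acc : Option String × Nat)
    (hacc : 0 < acc.2) (c : String)
    (hc : cols.find? (fun col => f col == some 0) = some c) :
    (cols.foldl (gstep f) acc).1 = some c := by
  induction cols generalizing acc with
  | nil => simp at hc
  | cons d ds ih =>
      rw [List.find?_cons] at hc
      by_cases hd : f d = some 0
      · simp [hd] at hc
        subst hc
        simp only [List.foldl_cons]
        have : gstep f acc d = (some d, 0) := by
          unfold gstep; rw [hd]; simp [hacc]
        rw [this, fold_zero_fixed]
      · have hne : (f d == some 0) = false := by simp [hd]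
        rw [hne] at hc
        simp only [List.foldl_cons]
        apply ih _ _ hc
        unfold gstep
        cases hfd : f d with
        | none => exact hacc
        | some i =>
            have hi : 0 < i := by
              rcases Nat.eq_zero_or_pos i with h0 | h0
              · exact absurd (h0 ▸ hfd) hd
              · exact h0
            simp only []
            split_ifs with h
            · exact hi
            · exact hacc

-- shifting every index (and the sentinel) by one does not change the chosen column
theorem fold_shift (f : String → Option Nat) (cols : List String) (acc : Option String × Nat) :
    cols.foldl (gstep (fun col => (f col).map (· + 1))) (acc.1, acc.2 + 1)
      = ((cols.foldl (gstep f) acc).1, (cols.foldl (gstep f) acc).2 + 1) := by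
  induction cols generalizing acc with
  | nil => rfl
  | cons d ds ih =>
      simp only [List.foldl_cons]
      cases hfd : f d with
      | none =>
          have h1 : gstep (fun col => (f col).map (· + 1)) (acc.1, acc.2 + 1) d = (acc.1, acc.2 + 1) := by
            unfold gstep; beta_reduce; rw [hfd]; rfl
          have h2 : gstep f acc d = acc := by
            unfold gstep; rw [hfd]
          rw [h1, h2]
          exact ih acc
      | some i =>
          have h1 : gstep (fun col => (f col).map (· + 1)) (acc.1, acc.2 + 1) d
              = if i < acc.2 then (some d, i + 1) else (acc.1, acc.2 + 1) := by
            unfold gstep; beta_reduce; rw [hfd]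
            simp only [Option.map_some]
            split_ifs with h h' h'
            · rfl
            · omega
            · omega
            · rfl
          have h2 : gstep f acc d = if i < acc.2 then (some d, i) else acc := by
            unfold gstep; rw [hfd]

          rw [h1, h2]
          split_ifs with h
          · exact ih (some d, i)
          · exact ih acc

-- main lemma: the one-pass minimum-index fold picks exactly what the nested first-match scan picks
theorem fold_eq_findSome (q : String → String → Bool) (kws : List String) (cols : List String) :
    (cols.foldl (gstep (fun col => kws.findIdx? (fun kw => q kw col))) ((none : Option String), kws.length)).1
      = kws.findSome? (fun kw => cols.find? (fun col => q kw col)) := by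
  induction kws generalizing cols with
  | nil =>
      have : ∀ acc : Option String × Nat,
          cols.foldl (gstep (fun col => ([] : List String).findIdx? (fun kw => q kw col))) acc = acc := by
        intro acc
        induction cols generalizing acc with
        | nil => rfl
        | cons d ds ih => simp only [List.foldl_cons]; rw [show gstep _ acc d = acc from rfl]; exact ih acc
      rw [this]; rfl
  | cons kw rest ih =>
      have hidx : ∀ col, (kw :: rest).findIdx? (fun kw' => q kw' col)
          = if q kw col then some 0 else (rest.findIdx? (fun kw' => q kw' col)).map (· + 1) := by
        intro col
        simp [List.findIdx?_cons]
      cases hfind : cols.find? (fun col => q kw col) with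
      | some c =>
          -- some column matches kw: its index function hits 0 at exactly the kw-matching columns
          have hc : cols.find?
              (fun col => ((kw :: rest).findIdx? (fun kw' => q kw' col)) == some 0) = some c := by
            rw [show (fun col => ((kw :: rest).findIdx? (fun kw' => q kw' col)) == some 0)
                = (fun col => q kw col) from ?_]
            · exact hfind
            · funext col
              rw [hidx col]
              cases hq : q kw col with
              | true => simp
              | false =>
                  cases rest.findIdx? (fun kw' => q kw' col) <;> simp
          rw [fold_zero_wins _ _ _ (by simp) c hc]
          simp [hfind]
      | none =>
          have hall : ∀ col ∈ cols, q kw col = false := by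
            intro col hcol
            have := List.find?_eq_none.mp hfind col hcol
            simpa using this
          have hcongr : cols.foldl (gstep (fun col => (kw :: rest).findIdx? (fun kw' => q kw' col)))
                ((none : Option String), (kw :: rest).length)
              = cols.foldl (gstep (fun col => (rest.findIdx? (fun kw' => q kw' col)).map (· + 1)))
                ((none : Option String), rest.length + 1) := by
            apply PySem.List.foldl_congr_mem
            intro acc col hcol
            unfold gstep
            beta_reduce
            rw [hidx col, hall col hcol]
            simp
          rw [hcongr,
            fold_shift (fun col => rest.findIdx? (fun kw' => q kw' col)) cols ((none : Option String), rest.length)]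
          simp only [List.findSome?_cons, hfind]
          exact ih cols

-- ===== VERDICT (by name: the statement is the Claim_ definition above) =====
theorem detect_target_metric_spec : Claim_equal_detect_target_metric := by
  intro metric_cols _
  unfold Spec_detect_target_metric detect_target_metric detect_target_metric_alt
  by_cases h : metric_cols = []
  · simp [h]
  · rw [if_neg h, if_neg h]
    have hf : pvFirstKwIdx = fun low =>
        (["revenue", "sales", "amount", "profit", "income"]).findIdx?
          (fun kw => PySem.Str.isIn kw low) := rfl
    have := fold_eq_findSome (fun kw col => PySem.Str.isIn kw (PySem.Str.lower col))
        ["revenue", "sales", "amount", "profit", "income"] metric_cols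
    have h5 : (["revenue", "sales", "amount", "profit", "income"] : List String).length = 5 := rfl
    rw [h5] at this
    rw [gstep_pvStep]
    simp only [hf]
    rw [this]
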